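-- pv_equiv track=rewrite | github.com/benwatson528/advent-of-code-24 | main/day09/disk_fragmenter.py | move_file
-- ===== SOURCE A (Python) =====
-- def move_file(disk_map, file_size_to_move, id_to_move):
--     empty_len = 0
--     for i, c in enumerate(disk_map):
--         if c == '.':
--             empty_len += 1
--             if empty_len == file_size_to_move:
--                 id_start_idx = disk_map.index(str(id_to_move))
--                 if id_start_idx < i:
--                     return disk_map
--                 disk_map = (disk_map[:id_start_idx] + (["."] * file_size_to_move) + disk_map[
--                                                                                     id_start_idx + file_size_to_move:])
--                 return disk_map[:i - empty_len + 1] + ([str(id_to_move)] * file_size_to_move) + disk_map[i + 1:]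
--         else:
--             empty_len = 0
--     return disk_map
-- ===== SOURCE B (Python) =====
-- def _empty_runs(disk_map):
--     """One pass: maximal runs of '.' as (start, length) tuples."""
--     runs = []
--     start = None
--     for i, c in enumerate(disk_map):
--         if c == '.':
--             if start is None:
--                 start = i
--         elif start is not None:
--             runs.append((start, i - start))
--             start = None
--     if start is not None:
--         runs.append((start, len(disk_map) - start))
--     return runs
--
--
-- def move_file(disk_map, file_size_to_move, id_to_move):
--     if file_size_to_move < 1:
--         return disk_map
--     gap = next((s for s, l in _empty_runs(disk_map)
--                 if l >= file_size_to_move), None)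
--     if gap is None:
--         return disk_map
--     file_start = disk_map.index(str(id_to_move))
--     if file_start < gap + file_size_to_move - 1:
--         return disk_map
--     out = list(disk_map)
--     out[file_start:file_start + file_size_to_move] = ['.'] * file_size_to_move
--     out[gap:gap + file_size_to_move] = [str(id_to_move)] * file_size_to_move
--     return out
-- ===== Notes on version B (the rewrite author's own statement) =====
-- stated objective: alternative
-- what changed: Replaces A's stateful scan (a consecutive-dot counter with an early return from inside the loop) by a gaps-first decomposition: one pass builds the list of maximal empty runs as (start,length) pairs, the first run of sufficient length is picked, and the move is done by two slice assignments on a copy.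
import Mathlib
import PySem

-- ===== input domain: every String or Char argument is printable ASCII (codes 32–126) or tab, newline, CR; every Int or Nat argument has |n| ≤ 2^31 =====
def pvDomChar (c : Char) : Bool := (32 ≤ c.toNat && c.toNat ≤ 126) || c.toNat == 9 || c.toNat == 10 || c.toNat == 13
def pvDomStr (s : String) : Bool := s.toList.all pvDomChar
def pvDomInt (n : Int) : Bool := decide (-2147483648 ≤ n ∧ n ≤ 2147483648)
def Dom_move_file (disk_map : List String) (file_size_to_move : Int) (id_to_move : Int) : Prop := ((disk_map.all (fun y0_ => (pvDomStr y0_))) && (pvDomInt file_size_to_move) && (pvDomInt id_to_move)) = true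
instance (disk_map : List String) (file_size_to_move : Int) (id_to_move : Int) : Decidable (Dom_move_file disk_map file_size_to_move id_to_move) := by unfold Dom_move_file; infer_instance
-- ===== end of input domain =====

-- B replaces A's stateful consecutive-dot counter with an early return from inside the
-- loop by a gaps-first decomposition (build all maximal empty runs, pick the first
-- fitting one, splice by slice assignment); objective: alternative (same cost).

-- ===== PORT A =====
-- A's for-loop over enumerate(disk_map) with the running counter empty_len; `i` is the
-- enumerate index.  Where Python's list.index raises ValueError the port returns the
-- list unchanged (those inputs are excluded by Pre_move_file).  Whenever the hit branch
-- is reached we have empty_len = fs ≥ 1 and i + 1 ≥ fs, so the Nat arithmetic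
-- `i + 1 - fs.toNat` equals Python's `i - empty_len + 1` and all slice bounds are
-- nonnegative, making take/drop exact for Python's slices.
def moveFileGo (orig : List String) (fs idm : Int) : Nat → List String → Int → List String
  | _, [], _ => orig
  | i, c :: rest, e =>
    if c == "." then
      if e + 1 == fs then
        match PySem.List.index? orig (PySem.Int.toStr idm) with
        | none => orig  -- Python raises ValueError here; excluded by Pre_move_file
        | some idx =>
          if (idx : Int) < (i : Int) then orig
          else
            let d2 := orig.take idx ++ List.replicate fs.toNat "." ++ orig.drop (idx + fs.toNat)
            d2.take (i + 1 - fs.toNat) ++ List.replicate fs.toNat (PySem.Int.toStr idm) ++ d2.drop (i + 1)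
      else moveFileGo orig fs idm (i + 1) rest (e + 1)
    else moveFileGo orig fs idm (i + 1) rest 0

def move_file (disk_map : List String) (file_size_to_move : Int) (id_to_move : Int) : List String :=
  moveFileGo disk_map file_size_to_move id_to_move 0 disk_map 0

-- ===== PORT B =====
-- B's one-pass `_empty_runs` helper: maximal runs of "." as (start, length) pairs;
-- the Option Nat state is Python's `start` variable.
def gapsGo : Nat → List String → Option Nat → List (Nat × Nat)
  | _, [], none => []
  | i, [], some s => [(s, i - s)]
  | i, c :: rest, none => if c == "." then gapsGo (i + 1) rest (some i) else gapsGo (i + 1) rest none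
  | i, c :: rest, some s => if c == "." then gapsGo (i + 1) rest (some s) else (s, i - s) :: gapsGo (i + 1) rest none

def empty_runs (d : List String) : List (Nat × Nat) := gapsGo 0 d none

-- `next((s for s,l in runs if l >= fs), None)` = List.find?; the two slice assignments
-- have nonnegative in-order bounds, so they are take/replicate/drop exactly as in Python.
def move_file_alt (disk_map : List String) (file_size_to_move : Int) (id_to_move : Int) : List String :=
  if file_size_to_move < 1 then disk_map
  else
    match (empty_runs disk_map).find? (fun p => decide (file_size_to_move ≤ (p.2 : Int))) with
    | none => disk_map
    | some (s, _) =>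
      match PySem.List.index? disk_map (PySem.Int.toStr id_to_move) with
      | none => disk_map  -- Python raises ValueError here; excluded by Pre_move_file
      | some fstart =>
        if (fstart : Int) < (s : Int) + file_size_to_move - 1 then disk_map
        else
          let out := disk_map.take fstart ++ List.replicate file_size_to_move.toNat "." ++ disk_map.drop (fstart + file_size_to_move.toNat)
          out.take s ++ List.replicate file_size_to_move.toNat (PySem.Int.toStr id_to_move) ++ out.drop (s + file_size_to_move.toNat)

-- ===== PRECONDITION & SPEC =====
-- Pre_ excludes exactly the inputs on which Python A raises ValueError: some run of
-- consecutive '.' has length ≥ file_size_to_move ≥ 1 but str(id_to_move) is not in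
-- disk_map.  (B's Python raises there too.)
def Pre_move_file (disk_map : List String) (file_size_to_move : Int) (id_to_move : Int) : Prop :=
  (1 ≤ file_size_to_move ∧
      ∃ k < disk_map.length,
        file_size_to_move ≤ (((disk_map.drop k).takeWhile (fun c => c == ".")).length : Int)) →
    (PySem.Int.toStr id_to_move) ∈ disk_map
instance (disk_map : List String) (file_size_to_move : Int) (id_to_move : Int) : Decidable (Pre_move_file disk_map file_size_to_move id_to_move) := by unfold Pre_move_file; infer_instance

def pvWitness_move_file : List String × Int × Int := (["0", ".", ".", "5", "5"], 2, 5)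

def Spec_move_file (disk_map : List String) (file_size_to_move : Int) (id_to_move : Int) (out : List String) : Prop := out = move_file_alt disk_map file_size_to_move id_to_move
instance (disk_map : List String) (file_size_to_move : Int) (id_to_move : Int) (out : List String) : Decidable (Spec_move_file disk_map file_size_to_move id_to_move out) := by unfold Spec_move_file; infer_instance

-- ===== CLAIM (what is proved, stated in full; the proofs are below) =====
def Claim_equal_move_file : Prop := ∀ (disk_map : List String) (file_size_to_move : Int) (id_to_move : Int), Dom_move_file disk_map file_size_to_move id_to_move → Pre_move_file disk_map file_size_to_move id_to_move → Spec_move_file disk_map file_size_to_move id_to_move (move_file disk_map file_size_to_move id_to_move)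

-- ===== LEMMAS AND PROOFS =====

-- If fs < 1, A's hit test `empty_len == fs` never fires (empty_len + 1 ≥ 1).
lemma moveFileGo_of_lt_one (orig : List String) (fs idm : Int) (hfs : fs < 1) :
    ∀ (rest : List String) (i : Nat) (e : Int), 0 ≤ e →
      moveFileGo orig fs idm i rest e = orig := by
  intro rest
  induction rest with
  | nil => intro i e _; simp [moveFileGo]
  | cons c rest ih =>
    intro i e he
    by_cases hc : c == "."
    · have hne : ¬ (e + 1 == fs) := by simp; omega
      simp [moveFileGo, hc, hne, ih (i + 1) (e + 1) (by omega)]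
    · simp [moveFileGo, hc, ih (i + 1) 0 le_rfl]

-- Once an open run starting at s0 already has length ≥ fs (scan position j), the first
-- fitting gap found by B is the gap starting at s0.
lemma gap_found (fs : Int) :
    ∀ (rest : List String) (j s0 : Nat), s0 ≤ j → fs ≤ ((j - s0 : Nat) : Int) →
      ∃ L, (gapsGo j rest (some s0)).find? (fun p => decide (fs ≤ (p.2 : Int))) = some (s0, L) := by
  intro rest
  induction rest with
  | nil =>
    intro j s0 hle hfs
    refine ⟨j - s0, ?_⟩
    simp [gapsGo, hfs]
  | cons c rest ih =>
    intro j s0 hle hfs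
    by_cases hc : c == "."
    · have := ih (j + 1) s0 (by omega) (by omega)
      simpa [gapsGo, hc] using this
    · refine ⟨j - s0, ?_⟩
      simp [gapsGo, hc, hfs]

-- The post-hit bodies of A and B coincide once the hit index i and the run start s'
-- are related by s' + fs = i + 1.
lemma hit_eq (orig : List String) (fs idm : Int) (i s' : Nat)
    (h : (s' : Int) + fs = (i : Int) + 1) (hfs : 1 ≤ fs) :
    (match PySem.List.index? orig (PySem.Int.toStr idm) with
     | none => orig
     | some idx =>
       if (idx : Int) < (i : Int) then orig
       else
         let d2 := orig.take idx ++ List.replicate fs.toNat "." ++ orig.drop (idx + fs.toNat)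
         d2.take (i + 1 - fs.toNat) ++ List.replicate fs.toNat (PySem.Int.toStr idm) ++ d2.drop (i + 1)) =
    (match PySem.List.index? orig (PySem.Int.toStr idm) with
     | none => orig
     | some fstart =>
       if (fstart : Int) < (s' : Int) + fs - 1 then orig
       else
         let out := orig.take fstart ++ List.replicate fs.toNat "." ++ orig.drop (fstart + fs.toNat)
         out.take s' ++ List.replicate fs.toNat (PySem.Int.toStr idm) ++ out.drop (s' + fs.toNat)) := by
  cases hidx : PySem.List.index? orig (PySem.Int.toStr idm) with
  | none => rfl
  | some idx =>
    simp only []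
    have h1 : i + 1 - fs.toNat = s' := by omega
    have h2 : s' + fs.toNat = i + 1 := by omega
    have h3 : (s' : Int) + fs - 1 = (i : Int) := by omega
    rw [h3, h1, ← h2]

-- Main loop invariant: A's scan state (index i, counter e) corresponds to B's open-run
-- state st, and both compute the same final list.
lemma main_go (orig : List String) (fs idm : Int) :
    ∀ (rest : List String) (i : Nat) (e : Int) (st : Option Nat),
      0 ≤ e → e < fs →
      (match st with
       | none => e = 0
       | some s => (s : Int) + e = (i : Int) ∧ 0 < e) →
      moveFileGo orig fs idm i rest e =
        (match (gapsGo i rest st).find? (fun p => decide (fs ≤ (p.2 : Int))) with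
         | none => orig
         | some (s, _) =>
           match PySem.List.index? orig (PySem.Int.toStr idm) with
           | none => orig
           | some fstart =>
             if (fstart : Int) < (s : Int) + fs - 1 then orig
             else
               let out := orig.take fstart ++ List.replicate fs.toNat "." ++ orig.drop (fstart + fs.toNat)
               out.take s ++ List.replicate fs.toNat (PySem.Int.toStr idm) ++ out.drop (s + fs.toNat)) := by
  intro rest
  induction rest with
  | nil =>
    intro i e st he hlt hst
    cases st with
    | none => simp [moveFileGo, gapsGo]
    | some s =>
      obtain ⟨hsum, hpos⟩ := hst
      have hfalse : ¬ (fs ≤ ((i - s : Nat) : Int)) := by omega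
      simp [moveFileGo, gapsGo, List.find?, hfalse]
  | cons c rest ih =>
    intro i e st he hlt hst
    by_cases hc : c == "."
    · by_cases hhit : e + 1 = fs
      · -- hit: A returns its spliced list; B's find? locates the run start s'.
        have hs' : ∀ s' : Nat, (s' : Int) + fs = (i : Int) + 1 →
            gapsGo i (c :: rest) st = gapsGo (i + 1) rest (some s') →
            moveFileGo orig fs idm i (c :: rest) e =
              (match (gapsGo i (c :: rest) st).find? (fun p => decide (fs ≤ (p.2 : Int))) with
               | none => orig
               | some (s, _) =>
                 match PySem.List.index? orig (PySem.Int.toStr idm) with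
                 | none => orig
                 | some fstart =>
                   if (fstart : Int) < (s : Int) + fs - 1 then orig
                   else
                     let out := orig.take fstart ++ List.replicate fs.toNat "." ++ orig.drop (fstart + fs.toNat)
                     out.take s ++ List.replicate fs.toNat (PySem.Int.toStr idm) ++ out.drop (s + fs.toNat)) := by
          intro s' hrel hgaps
          obtain ⟨L, hfind⟩ := gap_found fs rest (i + 1) s' (by omega) (by omega)
          rw [hgaps, hfind]
          have hA : moveFileGo orig fs idm i (c :: rest) e =
              (match PySem.List.index? orig (PySem.Int.toStr idm) with
               | none => orig
               | some idx =>
                 if (idx : Int) < (i : Int) then orig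
                 else
                   let d2 := orig.take idx ++ List.replicate fs.toNat "." ++ orig.drop (idx + fs.toNat)
                   d2.take (i + 1 - fs.toNat) ++ List.replicate fs.toNat (PySem.Int.toStr idm) ++ d2.drop (i + 1)) := by
            simp [moveFileGo, hc, hhit]
          rw [hA, hit_eq orig fs idm i s' hrel (by omega)]
        cases st with
        | none =>
          exact hs' i (by omega) (by simp [gapsGo, hc])
        | some s =>
          obtain ⟨hsum, hpos⟩ := hst
          exact hs' s (by omega) (by simp [gapsGo, hc])
      · -- no hit: both advance; the open run grows by one.
        have hA : moveFileGo orig fs idm i (c :: rest) e = moveFileGo orig fs idm (i + 1) rest (e + 1) := by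
          have : ¬ (e + 1 == fs) := by simpa using hhit
          simp [moveFileGo, hc, this]
        cases st with
        | none =>
          have hB : gapsGo i (c :: rest) none = gapsGo (i + 1) rest (some i) := by simp [gapsGo, hc]
          rw [hA, hB]
          exact ih (i + 1) (e + 1) (some i) (by omega) (by omega) (by constructor <;> omega)
        | some s =>
          obtain ⟨hsum, hpos⟩ := hst
          have hB : gapsGo i (c :: rest) (some s) = gapsGo (i + 1) rest (some s) := by simp [gapsGo, hc]
          rw [hA, hB]
          exact ih (i + 1) (e + 1) (some s) (by omega) (by omega) (by constructor <;> omega)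
    · -- non-dot: A resets the counter, B closes the (too short) run.
      have hA : moveFileGo orig fs idm i (c :: rest) e = moveFileGo orig fs idm (i + 1) rest 0 := by
        simp [moveFileGo, hc]
      cases st with
      | none =>
        have hB : gapsGo i (c :: rest) none = gapsGo (i + 1) rest none := by simp [gapsGo, hc]
        rw [hA, hB]
        exact ih (i + 1) 0 none le_rfl (by omega) rfl
      | some s =>
        obtain ⟨hsum, hpos⟩ := hst
        have hfalse : ¬ (fs ≤ ((i - s : Nat) : Int)) := by omega
        have hB : gapsGo i (c :: rest) (some s) = (s, i - s) :: gapsGo (i + 1) rest none := by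
          simp [gapsGo, hc]
        rw [hA, hB]
        have := ih (i + 1) 0 none le_rfl (by omega) rfl
        rw [this]
        simp [List.find?, hfalse]

lemma move_file_eq_alt (d : List String) (fs idm : Int) : move_file d fs idm = move_file_alt d fs idm := by
  unfold move_file move_file_alt empty_runs
  by_cases hfs : fs < 1
  · rw [if_pos hfs, moveFileGo_of_lt_one d fs idm hfs d 0 0 le_rfl]
  · rw [if_neg hfs]
    have := main_go d fs idm d 0 0 none le_rfl (by omega) rfl
    rw [this]

-- ===== VERDICT (by name: the statement is the Claim_ definition above) =====
theorem move_file_spec : Claim_equal_move_file := by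
  intro d fs idm _ _
  unfold Spec_move_file
  exact move_file_eq_alt d fs idm
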